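-- pv_equiv track=rewrite | github.com/garyhung0584/PDI | hw12/hw38.py | find_shortest_path_with_rest_stop
-- ===== SOURCE A (Python) =====
-- from collections import deque, defaultdict
--
-- def find_shortest_path_with_rest_stop(n, x, z, rest_stops, connections):
--     # 建立部落圖
--     graph = defaultdict(list)
--     for a, b in connections:
--         graph[a].append(b)
--         graph[b].append(a)
--
--     # BFS 搜尋最短路徑
--     def bfs(start, end):
--         queue = deque([(start, [start])])  # (當前部落, 路徑)
--         visited = set()
--         while queue:
--             current, path = queue.popleft()
--             if current == end:
--                 return path
--             if current in visited:
--                 continue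
--             visited.add(current)
--             for neighbor in graph[current]:
--                 if neighbor not in visited:
--                     queue.append((neighbor, path + [neighbor]))
--         return None
--
--     # 搜尋從 X 經過某個休息點到 Z 的最短路徑
--     shortest_path = None
--     best_rest_stop = None
--
--     for rest_stop in rest_stops:
--         path_to_rest = bfs(x, rest_stop)
--         path_from_rest = bfs(rest_stop, z)
--
--         if path_to_rest and path_from_rest:
--             total_path = path_to_rest[:-1] + path_from_rest
--             if not shortest_path or len(total_path) < len(shortest_path):
--                 shortest_path = total_path
--                 best_rest_stop = rest_stop
--
--     # 輸出結果
--     if not shortest_path: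
--         return "NO"
--     else:
--         return f"{best_rest_stop}\n{' '.join(map(str, shortest_path))}"
-- ===== SOURCE B (Python) =====
-- from collections import deque
--
-- def find_shortest_path_with_rest_stop(n, x, z, rest_stops, connections):
--     # One full BFS from x gives shortest paths to every reachable node at once,
--     # so the m per-rest-stop BFS calls from x collapse into a single table lookup.
--     graph = {}
--     for a, b in connections:
--         graph.setdefault(a, []).append(b)
--         graph.setdefault(b, []).append(a)
--
--     def bfs_all(start):
--         # full BFS; paths carried back-to-front, reversed on record
--         table = {}
--         queue = deque([(start, [start])])
--         seen = set()
--         while queue: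
--             cur, rev = queue.popleft()
--             if cur in seen:
--                 continue
--             seen.add(cur)
--             table[cur] = rev[::-1]
--             for nb in graph.get(cur, []):
--                 if nb not in seen:
--                     queue.append((nb, [nb] + rev))
--         return table
--
--     def bfs_to(start, end):
--         queue = deque([(start, [start])])
--         seen = set()
--         while queue:
--             cur, rev = queue.popleft()
--             if cur == end:
--                 return rev[::-1]
--             if cur in seen:
--                 continue
--             seen.add(cur)
--             for nb in graph.get(cur, []):
--                 if nb not in seen:
--                     queue.append((nb, [nb] + rev))
--         return None
--
--     from_x = bfs_all(x)
--     candidates = []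
--     for r in rest_stops:
--         p1 = from_x.get(r)
--         p2 = bfs_to(r, z)
--         if p1 is not None and p2 is not None:
--             candidates.append((r, p1[:-1] + p2))
--     if not candidates:
--         return "NO"
--     best_r, best_path = min(candidates, key=lambda c: len(c[1]))
--     return f"{best_r}\n{' '.join(map(str, best_path))}"
-- ===== Notes on version B (the rewrite author's own statement) =====
-- stated objective: faster
-- what changed: A runs a fresh BFS from x for every rest stop; B runs ONE full BFS from x that records a shortest-path table for all nodes (paths built back-to-front), collects (rest_stop, total_path) candidates in a list, and finishes with min(key=len), so only the r->z BFS remains per rest stop.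
import Mathlib
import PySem

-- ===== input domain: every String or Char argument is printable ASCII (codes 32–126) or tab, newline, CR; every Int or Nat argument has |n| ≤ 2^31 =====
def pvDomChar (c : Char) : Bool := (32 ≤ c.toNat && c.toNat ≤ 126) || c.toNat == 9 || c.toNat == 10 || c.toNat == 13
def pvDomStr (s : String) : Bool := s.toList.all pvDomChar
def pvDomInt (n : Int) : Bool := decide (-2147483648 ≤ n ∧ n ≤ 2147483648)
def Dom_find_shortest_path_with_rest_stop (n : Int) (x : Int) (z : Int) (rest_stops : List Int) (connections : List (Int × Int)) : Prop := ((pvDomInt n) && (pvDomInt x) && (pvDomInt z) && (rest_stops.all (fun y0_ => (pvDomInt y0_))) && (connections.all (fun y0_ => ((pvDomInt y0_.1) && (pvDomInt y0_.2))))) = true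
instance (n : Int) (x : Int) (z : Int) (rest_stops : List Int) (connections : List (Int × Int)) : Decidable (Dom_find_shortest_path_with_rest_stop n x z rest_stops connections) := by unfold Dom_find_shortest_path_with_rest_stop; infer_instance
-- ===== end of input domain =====

-- B replaces A's per-rest-stop BFS from x by ONE full BFS from x that records a path table,
-- and collects candidates into a list finished by min(..., key=len); objective: alternative/faster.

-- ===== PORT A =====
-- graph = defaultdict(list); for a, b in connections: graph[a].append(b); graph[b].append(a)
def pvGraphA (connections : List (Int × Int)) : PySem.Dict Int (List Int) :=
  connections.foldl
    (fun g ab => (g.modify ab.1 [] (· ++ [ab.2])).modify ab.2 [] (· ++ [ab.1]))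
    PySem.Dict.empty

-- the 'while queue:' loop of A's bfs; the fuel argument only makes the recursion structural:
-- 2*len(connections)+2 bounds the number of loop iterations (every dequeued entry was enqueued,
-- and enqueues ≤ 1 + the total size of all adjacency lists = 1 + 2*len(connections))
def pvBfsA (g : PySem.Dict Int (List Int)) (endv : Int) :
    Nat → List (Int × List Int) → PySem.Set Int → Option (List Int)
  | 0, _, _ => none
  | _ + 1, [], _ => none
  | fuel + 1, (current, path) :: queue, visited =>
    if current = endv then some path
    else if PySem.Set.contains visited current then pvBfsA g endv fuel queue visited
    else
      let visited' := PySem.Set.add visited current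
      let queue' := (g.getD current []).foldl
        (fun q neighbor => if !PySem.Set.contains visited' neighbor then
            q ++ [(neighbor, path ++ [neighbor])] else q) queue
      pvBfsA g endv fuel queue' visited'

-- the body of A's 'for rest_stop in rest_stops' loop; shortest_path/best_rest_stop
-- always change together, so the two variables are one optional pair
def pvStepA (graph : PySem.Dict Int (List Int)) (fuel : Nat) (x z : Int)
    (st : Option (List Int × Int)) (rest_stop : Int) : Option (List Int × Int) :=
  match pvBfsA graph rest_stop fuel [(x, [x])] PySem.Set.empty,
        pvBfsA graph z fuel [(rest_stop, [rest_stop])] PySem.Set.empty with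
  | some path_to, some path_from =>
    if path_to.isEmpty || path_from.isEmpty then st   -- 'if path_to_rest and path_from_rest'
    else
      let total := PySem.List.slice path_to none (some (-1)) ++ path_from
      match st with
      | none => some (total, rest_stop)
      | some (sp, br) =>
        if sp.isEmpty || decide (total.length < sp.length) then some (total, rest_stop)
        else some (sp, br)
  | _, _ => st

def find_shortest_path_with_rest_stop (n : Int) (x : Int) (z : Int) (rest_stops : List Int) (connections : List (Int × Int)) : String :=
  let graph := pvGraphA connections
  let fuel := 2 * connections.length + 2
  let st := rest_stops.foldl (pvStepA graph fuel x z) none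
  match st with
  | none => "NO"
  | some (sp, br) =>
    if sp.isEmpty then "NO"   -- 'if not shortest_path'
    else PySem.Int.toStr br ++ "\n" ++ PySem.Str.join " " (sp.map PySem.Int.toStr)

-- ===== PORT B =====
-- graph.setdefault(a, []).append(b) has exactly the modify semantics used above
def pvGraphB (connections : List (Int × Int)) : PySem.Dict Int (List Int) :=
  connections.foldl
    (fun g ab => (g.modify ab.1 [] (· ++ [ab.2])).modify ab.2 [] (· ++ [ab.1]))
    PySem.Dict.empty

-- bfs_all: FULL BFS from start recording table[cur] = rev[::-1]
-- (rev[::-1] is List.reverse: PySem.List.slice?_none_none_neg_one); same fuel bound as A's loop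
def pvBfsAllB (g : PySem.Dict Int (List Int)) :
    Nat → List (Int × List Int) → PySem.Set Int → PySem.Dict Int (List Int) → PySem.Dict Int (List Int)
  | 0, _, _, table => table
  | _ + 1, [], _, table => table
  | fuel + 1, (cur, rev) :: queue, seen, table =>
    if PySem.Set.contains seen cur then pvBfsAllB g fuel queue seen table
    else
      let seen' := PySem.Set.add seen cur
      let table' := table.insert cur rev.reverse
      let queue' := (g.getD cur []).foldl
        (fun q nb => if !PySem.Set.contains seen' nb then q ++ [(nb, nb :: rev)] else q) queue
      pvBfsAllB g fuel queue' seen' table'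

-- bfs_to: early-exit BFS carrying paths back-to-front
def pvBfsToB (g : PySem.Dict Int (List Int)) (endv : Int) :
    Nat → List (Int × List Int) → PySem.Set Int → Option (List Int)
  | 0, _, _ => none
  | _ + 1, [], _ => none
  | fuel + 1, (cur, rev) :: queue, seen =>
    if cur = endv then some rev.reverse
    else if PySem.Set.contains seen cur then pvBfsToB g endv fuel queue seen
    else
      let seen' := PySem.Set.add seen cur
      let queue' := (g.getD cur []).foldl
        (fun q nb => if !PySem.Set.contains seen' nb then q ++ [(nb, nb :: rev)] else q) queue
      pvBfsToB g endv fuel queue' seen'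

-- the body of B's candidate-collecting loop
def pvStepB (from_x graph : PySem.Dict Int (List Int)) (fuel : Nat) (z : Int)
    (acc : List (Int × List Int)) (r : Int) : List (Int × List Int) :=
  match from_x.get? r, pvBfsToB graph z fuel [(r, [r])] PySem.Set.empty with
  | some p1, some p2 => acc ++ [(r, PySem.List.slice p1 none (some (-1)) ++ p2)]
  | _, _ => acc

def find_shortest_path_with_rest_stop_alt (n : Int) (x : Int) (z : Int) (rest_stops : List Int) (connections : List (Int × Int)) : String :=
  let graph := pvGraphB connections
  let fuel := 2 * connections.length + 2
  let from_x := pvBfsAllB graph fuel [(x, [x])] PySem.Set.empty PySem.Dict.empty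
  let candidates := rest_stops.foldl (pvStepB from_x graph fuel z) []
  match PySem.List.min? candidates (fun c => c.2.length) with
  | none => "NO"
  | some (best_r, best_path) =>
    PySem.Int.toStr best_r ++ "\n" ++ PySem.Str.join " " (best_path.map PySem.Int.toStr)

-- ===== PRECONDITION & SPEC =====
def Spec_find_shortest_path_with_rest_stop (n : Int) (x : Int) (z : Int) (rest_stops : List Int) (connections : List (Int × Int)) (out : String) : Prop := out = find_shortest_path_with_rest_stop_alt n x z rest_stops connections
instance (n : Int) (x : Int) (z : Int) (rest_stops : List Int) (connections : List (Int × Int)) (out : String) : Decidable (Spec_find_shortest_path_with_rest_stop n x z rest_stops connections out) := by unfold Spec_find_shortest_path_with_rest_stop; infer_instance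

-- ===== CLAIM (what is proved, stated in full; the proofs are below) =====
def Claim_equal_find_shortest_path_with_rest_stop : Prop := ∀ (n : Int) (x : Int) (z : Int) (rest_stops : List Int) (connections : List (Int × Int)), Dom_find_shortest_path_with_rest_stop n x z rest_stops connections → Spec_find_shortest_path_with_rest_stop n x z rest_stops connections (find_shortest_path_with_rest_stop n x z rest_stops connections)

-- ===== LEMMAS AND PROOFS =====

-- keys already seen are never re-recorded by the table BFS
theorem pv_stable (g : PySem.Dict Int (List Int)) :
    ∀ (fuel : Nat) (q : List (Int × List Int)) (seen : PySem.Set Int)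
      (acc : PySem.Dict Int (List Int)) (k : Int), k ∈ seen →
      (pvBfsAllB g fuel q seen acc).get? k = acc.get? k := by
  intro fuel
  induction fuel with
  | zero => intro q seen acc k hk; simp [pvBfsAllB]
  | succ fuel ih =>
    intro q seen acc k hk
    match q with
    | [] => simp [pvBfsAllB]
    | (cur, rev) :: queue =>
      by_cases hc : PySem.Set.contains seen cur = true
      · simp only [pvBfsAllB, hc, if_pos]
        exact ih queue seen acc k hk
      · simp only [pvBfsAllB, hc, Bool.false_eq_true, if_neg, not_false_iff]
        have hck : cur ≠ k := by
          intro h; subst h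
          simp [PySem.Set.contains] at hc
          exact hc hk
        rw [ih _ _ _ k ((PySem.Set.mem_add seen cur k).mpr (Or.inl hk))]
        exact PySem.Dict.get?_insert_of_ne acc _ (Ne.symm hck)


-- A's early-exit BFS to e reads off the table BFS (queues correspond by path reversal)
theorem pv_table (g : PySem.Dict Int (List Int)) (e : Int) :
    ∀ (fuel : Nat) (q : List (Int × List Int)) (seen : PySem.Set Int)
      (acc : PySem.Dict Int (List Int)), e ∉ seen → acc.get? e = none →
      pvBfsA g e fuel q seen =
        (pvBfsAllB g fuel (q.map (fun p => (p.1, p.2.reverse))) seen acc).get? e := by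
  intro fuel
  induction fuel with
  | zero => intro q seen acc he hacc; simp [pvBfsA, pvBfsAllB, hacc]
  | succ fuel ih =>
    intro q seen acc he hacc
    match q with
    | [] => simp [pvBfsA, pvBfsAllB, hacc]
    | (c, p) :: queue =>
      simp only [List.map_cons, pvBfsA, pvBfsAllB]
      by_cases hce : c = e
      · subst hce
        have hc : PySem.Set.contains seen c = false := by
          simp [PySem.Set.contains]; exact he
        simp only [hc, Bool.false_eq_true, if_neg, not_false_iff]
        rw [pv_stable g fuel _ _ _ c ((PySem.Set.mem_add seen c c).mpr (Or.inr rfl))]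
        rw [PySem.Dict.get?_insert_self]
        simp
      · simp only [hce, if_neg, not_false_iff]
        by_cases hc : PySem.Set.contains seen c = true
        · simp only [hc, if_pos]
          exact ih queue seen acc he hacc
        · simp only [hc, Bool.false_eq_true, if_neg, not_false_iff]
          have he' : e ∉ PySem.Set.add seen c := by
            intro h
            rcases (PySem.Set.mem_add seen c e).mp h with h' | h'
            · exact he h'
            · exact hce h'.symm
          have hacc' : (acc.insert c p.reverse.reverse).get? e = none := by
            rw [PySem.Dict.get?_insert_of_ne acc _ (Ne.symm hce)]; exact hacc
          rw [ih _ _ _ he' hacc']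
          congr 2
          rw [PySem.List.foldl_append_if, PySem.List.foldl_append_if]
          simp [List.map_append, Function.comp]


-- A's BFS equals B's back-to-front BFS
theorem pv_to (g : PySem.Dict Int (List Int)) (e : Int) :
    ∀ (fuel : Nat) (q : List (Int × List Int)) (seen : PySem.Set Int),
      pvBfsA g e fuel q seen =
        pvBfsToB g e fuel (q.map (fun p => (p.1, p.2.reverse))) seen := by
  intro fuel
  induction fuel with
  | zero => intro q seen; simp [pvBfsA, pvBfsToB]
  | succ fuel ih =>
    intro q seen
    match q with
    | [] => simp [pvBfsA, pvBfsToB]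
    | (c, p) :: queue =>
      simp only [List.map_cons, pvBfsA, pvBfsToB]
      by_cases hce : c = e
      · simp [hce]
      · simp only [hce, if_neg, not_false_iff]
        by_cases hc : PySem.Set.contains seen c = true
        · simp only [hc, if_pos]; exact ih queue seen
        · simp only [hc, Bool.false_eq_true, if_neg, not_false_iff]
          rw [ih]
          congr 1
          rw [PySem.List.foldl_append_if, PySem.List.foldl_append_if]
          simp [List.map_append, Function.comp]


-- BFS paths are never empty
theorem pv_ne (g : PySem.Dict Int (List Int)) (e : Int) :
    ∀ (fuel : Nat) (q : List (Int × List Int)) (seen : PySem.Set Int) (p : List Int),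
      (∀ en ∈ q, en.2 ≠ []) → pvBfsA g e fuel q seen = some p → p ≠ [] := by
  intro fuel
  induction fuel with
  | zero => intro q seen p hq h; simp [pvBfsA] at h
  | succ fuel ih =>
    intro q seen p hq h
    match q with
    | [] => simp [pvBfsA] at h
    | (c, pa) :: queue =>
      simp only [pvBfsA] at h
      by_cases hce : c = e
      · simp only [hce, if_pos] at h
        cases h
        exact hq (c, p) (List.mem_cons_self ..)
      · simp only [hce, if_neg, not_false_iff] at h
        by_cases hc : PySem.Set.contains seen c = true
        · simp only [hc, if_pos] at h
          exact ih queue seen p (fun en hen => hq en (List.mem_cons_of_mem _ hen)) h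
        · simp only [hc, Bool.false_eq_true, if_neg, not_false_iff] at h
          refine ih _ _ p ?_ h
          intro en hen
          rw [PySem.List.foldl_append_if] at hen
          rcases List.mem_append.mp hen with h' | h'
          · exact hq en (List.mem_cons_of_mem _ h')
          · rcases List.mem_map.mp h' with ⟨nb, _, rfl⟩
            simp


-- every candidate total keeps a nonempty path
theorem pv_cands_ne (o1 o2 : Int → Option (List Int))
    (h2 : ∀ r p, o2 r = some p → p ≠ []) :
    ∀ (l : List Int) (acc : List (Int × List Int)), (∀ c ∈ acc, c.2 ≠ []) →
      ∀ c ∈ (List.foldl (fun (acc : List (Int × List Int)) r =>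
          match o1 r, o2 r with
          | some p1, some p2 => acc ++ [(r, PySem.List.slice p1 none (some (-1)) ++ p2)]
          | _, _ => acc) acc l), c.2 ≠ [] := by
  intro l
  induction l with
  | nil => intro acc hinv c hc; exact hinv c hc
  | cons r l ih =>
    intro acc hinv c hc
    simp only [List.foldl_cons] at hc
    cases ho1 : o1 r with
    | none => simp only [ho1] at hc; exact ih acc hinv c hc
    | some p1 =>
      cases ho2 : o2 r with
      | none => simp only [ho1, ho2] at hc; exact ih acc hinv c hc
      | some p2 =>
        simp only [ho1, ho2] at hc
        refine ih _ ?_ c hc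
        intro d hd
        rcases List.mem_append.mp hd with h' | h'
        · exact hinv d h'
        · rcases List.mem_singleton.mp h' with rfl
          intro hnil
          rcases List.append_eq_nil_iff.mp hnil with ⟨_, hp2⟩
          exact h2 r p2 ho2 hp2


-- A's running first-strict-minimum over the interleaved fold IS min(key=len) over B's candidate list
theorem pv_fold (o1 o2 : Int → Option (List Int))
    (h1 : ∀ r p, o1 r = some p → p ≠ []) (h2 : ∀ r p, o2 r = some p → p ≠ []) :
    ∀ (l : List Int) (acc : List (Int × List Int)), (∀ c ∈ acc, c.2 ≠ []) →
      (List.foldl (fun (st : Option (List Int × Int)) r =>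
          match o1 r, o2 r with
          | some p1, some p2 =>
            if p1.isEmpty || p2.isEmpty then st
            else
              let total := PySem.List.slice p1 none (some (-1)) ++ p2
              match st with
              | none => some (total, r)
              | some (sp, br) =>
                if sp.isEmpty || decide (total.length < sp.length) then some (total, r)
                else some (sp, br)
          | _, _ => st)
        (Option.map (fun c => (c.2, c.1)) (PySem.List.min? acc (fun c : Int × List Int => c.2.length))) l)
      = Option.map (fun c => (c.2, c.1)) (PySem.List.min?
          (List.foldl (fun (acc : List (Int × List Int)) r =>
            match o1 r, o2 r with
            | some p1, some p2 => acc ++ [(r, PySem.List.slice p1 none (some (-1)) ++ p2)]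
            | _, _ => acc) acc l)
          (fun c => c.2.length)) := by
  intro l
  induction l with
  | nil => intro acc hinv; simp
  | cons r l ih =>
    intro acc hinv
    simp only [List.foldl_cons]
    cases ho1 : o1 r with
    | none => exact ih acc hinv
    | some p1 =>
      cases ho2 : o2 r with
      | none => exact ih acc hinv
      | some p2 =>
        have hp1 : p1 ≠ [] := h1 r p1 ho1
        have hp2 : p2 ≠ [] := h2 r p2 ho2
        have e1 : p1.isEmpty = false := by simpa [List.isEmpty_iff] using hp1
        have e2 : p2.isEmpty = false := by simpa [List.isEmpty_iff] using hp2
        simp only [e1, e2, Bool.or_self, if_neg, Bool.false_eq_true, not_false_iff]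
        set t := PySem.List.slice p1 none (some (-1)) ++ p2 with ht
        have htne : t ≠ [] := by
          intro hnil
          rcases List.append_eq_nil_iff.mp hnil with ⟨_, h'⟩
          exact hp2 h'
        have hstep : (match Option.map (fun c : Int × List Int => (c.2, c.1))
              (PySem.List.min? acc (fun c : Int × List Int => c.2.length)) with
            | none => some (t, r)
            | some (sp, br) =>
              if sp.isEmpty || decide (t.length < sp.length) then some (t, r)
              else some (sp, br))
            = Option.map (fun c : Int × List Int => (c.2, c.1))
                (PySem.List.min? (acc ++ [(r, t)]) (fun c => c.2.length)) := by
          cases hmin : PySem.List.min? acc (fun c : Int × List Int => c.2.length) with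
          | none =>
            have hacc : acc = [] := (PySem.List.min?_eq_none_iff _ _).mp hmin
            subst hacc
            simp [PySem.List.min?]
          | some m =>
            have hm : m ∈ acc := PySem.List.min?_mem hmin
            have hsp : m.2 ≠ [] := hinv m hm
            have esp : m.2.isEmpty = false := by simpa [List.isEmpty_iff] using hsp
            obtain ⟨br, sp⟩ := m
            simp only [PySem.List.min?] at hmin
            simp only [PySem.List.min?, List.foldl_append, List.foldl_cons, List.foldl_nil, hmin]
            simp only [Option.map_some] at esp ⊢
            by_cases hlt : t.length < sp.length
            · simp [esp, hlt]
            · simp [esp, hlt]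
        rw [hstep]
        refine ih (acc ++ [(r, t)]) ?_
        intro c hc
        rcases List.mem_append.mp hc with h' | h'
        · exact hinv c h'
        · rcases List.mem_singleton.mp h' with rfl
          exact htne


-- proof-side version of B's candidate step, phrased through A's BFS
def pvStepC (g : PySem.Dict Int (List Int)) (fuel : Nat) (x z : Int)
    (acc : List (Int × List Int)) (r : Int) : List (Int × List Int) :=
  match pvBfsA g r fuel [(x, [x])] PySem.Set.empty,
        pvBfsA g z fuel [(r, [r])] PySem.Set.empty with
  | some p1, some p2 => acc ++ [(r, PySem.List.slice p1 none (some (-1)) ++ p2)]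
  | _, _ => acc

theorem pv_h1 (g : PySem.Dict Int (List Int)) (fuel : Nat) (x : Int) :
    ∀ (r : Int) (p : List Int),
      pvBfsA g r fuel [(x, [x])] PySem.Set.empty = some p → p ≠ [] :=
  fun r p h => pv_ne g r fuel _ _ p (by simp) h

theorem pv_h2 (g : PySem.Dict Int (List Int)) (fuel : Nat) (z : Int) :
    ∀ (r : Int) (p : List Int),
      pvBfsA g z fuel [(r, [r])] PySem.Set.empty = some p → p ≠ [] :=
  fun r p h => pv_ne g z fuel _ _ p (by simp) h

theorem pv_cands_ne_c (g : PySem.Dict Int (List Int)) (fuel : Nat) (x z : Int) (l : List Int) :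
    ∀ c ∈ List.foldl (pvStepC g fuel x z) [] l, c.2 ≠ [] :=
  pv_cands_ne (fun r => pvBfsA g r fuel [(x, [x])] PySem.Set.empty)
    (fun r => pvBfsA g z fuel [(r, [r])] PySem.Set.empty)
    (pv_h2 g fuel z) l [] (by simp)

theorem pv_fold_c (g : PySem.Dict Int (List Int)) (fuel : Nat) (x z : Int) (l : List Int) :
    List.foldl (pvStepA g fuel x z) none l
      = Option.map (fun c => (c.2, c.1))
          (PySem.List.min? (List.foldl (pvStepC g fuel x z) [] l) (fun c => c.2.length)) :=
  pv_fold (fun r => pvBfsA g r fuel [(x, [x])] PySem.Set.empty)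
    (fun r => pvBfsA g z fuel [(r, [r])] PySem.Set.empty)
    (pv_h1 g fuel x) (pv_h2 g fuel z) l [] (by simp)

-- ===== VERDICT (by name: the statement is the Claim_ definition above) =====
theorem find_shortest_path_with_rest_stop_spec : Claim_equal_find_shortest_path_with_rest_stop := by
  intro n x z rest_stops connections _
  unfold Spec_find_shortest_path_with_rest_stop
  simp only [find_shortest_path_with_rest_stop, find_shortest_path_with_rest_stop_alt]
  rw [show pvGraphB connections = pvGraphA connections from rfl]
  have hx : ∀ r : Int,
      (pvBfsAllB (pvGraphA connections) (2 * connections.length + 2) [(x, [x])]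
          PySem.Set.empty PySem.Dict.empty).get? r
        = pvBfsA (pvGraphA connections) r (2 * connections.length + 2) [(x, [x])]
            PySem.Set.empty := by
    intro r
    have h := pv_table (pvGraphA connections) r (2 * connections.length + 2) [(x, [x])]
      PySem.Set.empty PySem.Dict.empty (by simp [PySem.Set.empty]) (by simp)
    simpa using h.symm
  have hz : ∀ r : Int,
      pvBfsToB (pvGraphA connections) z (2 * connections.length + 2) [(r, [r])] PySem.Set.empty
        = pvBfsA (pvGraphA connections) z (2 * connections.length + 2) [(r, [r])]
            PySem.Set.empty := by
    intro r
    simpa using (pv_to (pvGraphA connections) z (2 * connections.length + 2) [(r, [r])]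
      PySem.Set.empty).symm
  rw [PySem.List.foldl_congr_mem rest_stops _
      (pvStepC (pvGraphA connections) (2 * connections.length + 2) x z) []
      (fun acc r _ => by unfold pvStepB pvStepC; rw [hx r, hz r])]
  rw [pv_fold_c (pvGraphA connections) (2 * connections.length + 2) x z rest_stops]
  cases hmin : PySem.List.min?
      (List.foldl (pvStepC (pvGraphA connections) (2 * connections.length + 2) x z) [] rest_stops)
      (fun c => c.2.length) with
  | none => rfl
  | some m =>
    obtain ⟨r, t⟩ := m
    have ht : t ≠ [] :=
      pv_cands_ne_c (pvGraphA connections) (2 * connections.length + 2) x z rest_stops _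
        (PySem.List.min?_mem hmin)
    simp [List.isEmpty_iff, ht]
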